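-- pv_equiv track=rewrite | github.com/epicboi-deepubhai/Python-Version-Control-System | pvcs/diff.py | compare_file_states
-- ===== SOURCE A (Python) =====
-- def compare_file_states(old_files, new_files):
--     old_set = set(old_files.keys())
--     new_set = set(new_files.keys())
--
--     added = new_set - old_set
--     removed = old_set - new_set
--     common = old_set & new_set
--
--     modified = []
--     for file_path in common:
--         if old_files[file_path] != new_files[file_path]:
--             modified.append(file_path)
--
--     return sorted(added), sorted(removed), sorted(modified)
-- ===== SOURCE B (Python) =====
-- def compare_file_states(old_files, new_files):
--     old_keys = sorted(old_files)
--     new_keys = sorted(new_files)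
--     added, removed, modified = [], [], []
--     i = j = 0
--     while i < len(old_keys) and j < len(new_keys):
--         o, n = old_keys[i], new_keys[j]
--         if o < n:
--             removed.append(o)
--             i += 1
--         elif n < o:
--             added.append(n)
--             j += 1
--         else:
--             if old_files[o] != new_files[o]:
--                 modified.append(o)
--             i += 1
--             j += 1
--     removed.extend(old_keys[i:])
--     added.extend(new_keys[j:])
--     return added, removed, modified
-- ===== Notes on version B (the rewrite author's own statement) =====
-- stated objective: alternative
-- what changed: Replaces A's three set operations (difference twice, intersection with a lookup loop) followed by three separate sorts with a single two-pointer merge over the two sorted key lists that classifies each key as added/removed/modified in one pass.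
import Mathlib
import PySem

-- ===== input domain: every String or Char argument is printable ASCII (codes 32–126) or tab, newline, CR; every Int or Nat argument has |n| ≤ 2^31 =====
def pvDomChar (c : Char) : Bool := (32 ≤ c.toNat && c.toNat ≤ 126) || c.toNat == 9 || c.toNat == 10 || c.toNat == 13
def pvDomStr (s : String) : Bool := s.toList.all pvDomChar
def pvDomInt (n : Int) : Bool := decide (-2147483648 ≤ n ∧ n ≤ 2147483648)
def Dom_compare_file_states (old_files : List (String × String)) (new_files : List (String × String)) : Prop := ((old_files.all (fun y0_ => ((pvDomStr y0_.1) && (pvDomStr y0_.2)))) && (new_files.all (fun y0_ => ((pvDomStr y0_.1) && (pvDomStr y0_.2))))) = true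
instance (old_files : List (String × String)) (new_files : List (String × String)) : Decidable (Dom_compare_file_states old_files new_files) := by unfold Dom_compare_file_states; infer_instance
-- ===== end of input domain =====

-- B replaces A's three set operations plus three final sorts by one two-pointer merge of the two
-- sorted key lists (alternative decomposition, similar cost).

-- ===== PORT A =====
def compare_file_states (old_files : List (String × String)) (new_files : List (String × String)) : List String × List String × List String :=
  let old_set := PySem.Set.ofList (PySem.Dict.mk old_files).keys
  let new_set := PySem.Set.ofList (PySem.Dict.mk new_files).keys
  let added := PySem.Set.diff new_set old_set
  let removed := PySem.Set.diff old_set new_set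
  let common := PySem.Set.inter old_set new_set
  let modified := common.foldl (fun acc file_path =>
      if (PySem.Dict.mk old_files).get? file_path ≠ (PySem.Dict.mk new_files).get? file_path
      then acc ++ [file_path] else acc) []
  (PySem.List.sorted added (fun x => x), PySem.List.sorted removed (fun x => x),
   PySem.List.sorted modified (fun x => x))

-- ===== PORT B =====
-- the two-pointer merge walk of Source B (consumes the two sorted key lists front to back)
def pvMerge (oldd newd : PySem.Dict String String) : List String → List String → List String × List String × List String
  | [], ns => (ns, [], [])
  | os, [] => ([], os, [])
  | o :: os, n :: ns =>
    if o < n then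
      let (a, r, m) := pvMerge oldd newd os (n :: ns)
      (a, o :: r, m)
    else if n < o then
      let (a, r, m) := pvMerge oldd newd (o :: os) ns
      (n :: a, r, m)
    else
      let (a, r, m) := pvMerge oldd newd os ns
      if oldd.get? o ≠ newd.get? o then (a, r, o :: m) else (a, r, m)
termination_by os ns => os.length + ns.length

def compare_file_states_alt (old_files : List (String × String)) (new_files : List (String × String)) : List String × List String × List String :=
  let old_keys := PySem.List.sorted (PySem.Dict.mk old_files).keys (fun x => x)
  let new_keys := PySem.List.sorted (PySem.Dict.mk new_files).keys (fun x => x)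
  pvMerge (PySem.Dict.mk old_files) (PySem.Dict.mk new_files) old_keys new_keys

-- ===== PRECONDITION & SPEC =====
-- An association list with duplicate keys does not encode any Python dict (dict keys are unique),
-- so Pre_ restricts both arguments to genuine dict encodings; it excludes no Python input of A.
def Pre_compare_file_states (old_files : List (String × String)) (new_files : List (String × String)) : Prop :=
  (old_files.map Prod.fst).Nodup ∧ (new_files.map Prod.fst).Nodup
instance (old_files : List (String × String)) (new_files : List (String × String)) : Decidable (Pre_compare_file_states old_files new_files) := by unfold Pre_compare_file_states; infer_instance

def pvWitness_compare_file_states : (List (String × String)) × (List (String × String)) :=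
  ([("a.txt", "1"), ("b.txt", "2")], [("b.txt", "3"), ("c.txt", "4")])

def Spec_compare_file_states (old_files : List (String × String)) (new_files : List (String × String)) (out : List String × List String × List String) : Prop := out = compare_file_states_alt old_files new_files
instance (old_files : List (String × String)) (new_files : List (String × String)) (out : List String × List String × List String) : Decidable (Spec_compare_file_states old_files new_files out) := by unfold Spec_compare_file_states; infer_instance

-- ===== CLAIM (what is proved, stated in full; the proofs are below) =====
def Claim_equal_compare_file_states : Prop := ∀ (old_files : List (String × String)) (new_files : List (String × String)), Dom_compare_file_states old_files new_files → Pre_compare_file_states old_files new_files → Spec_compare_file_states old_files new_files (compare_file_states old_files new_files)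

-- ===== LEMMAS AND PROOFS =====

-- a strictly increasing list is closed under "head is below everything in the tail"
theorem pv_strict_of_nodup_le (l : List String) (hnd : l.Nodup) (hle : l.Pairwise (· ≤ ·)) :
    l.Pairwise (· < ·) :=
  (hle.and hnd).imp (fun h => lt_of_le_of_ne h.1 h.2)

-- the merge walk, on strictly increasing inputs, computes the three filters
theorem pvMerge_spec (oldd newd : PySem.Dict String String) (xs ys : List String)
    (hx : xs.Pairwise (· < ·)) (hy : ys.Pairwise (· < ·)) :
    pvMerge oldd newd xs ys =
      (ys.filter (fun n => !xs.contains n),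
       xs.filter (fun o => !ys.contains o),
       xs.filter (fun o => ys.contains o && decide (oldd.get? o ≠ newd.get? o))) := by
  induction xs, ys using pvMerge.induct oldd newd with
  | case1 ns => simp [pvMerge]
  | case2 os => simp [pvMerge]
  | case3 o os n ns hlt a r m heq ih =>
    obtain ⟨ho, hos⟩ := List.pairwise_cons.mp hx
    obtain ⟨hn, hns⟩ := List.pairwise_cons.mp hy
    have hoy : ∀ y ∈ n :: ns, o < y := by
      intro y hy'
      rcases List.mem_cons.mp hy' with h | h
      · exact h ▸ hlt
      · exact hlt.trans (hn y h)
    have hnot : o ∉ n :: ns := fun h => lt_irrefl o (hoy o h)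
    have hA : List.filter (fun y => !(o :: os).contains y) (n :: ns)
        = List.filter (fun y => !os.contains y) (n :: ns) :=
      List.filter_congr (fun y hy' => by
        have : y ≠ o := ne_of_gt (hoy y hy'); simp [this])
    have hR : List.filter (fun x => !(n :: ns).contains x) (o :: os)
        = o :: List.filter (fun x => !(n :: ns).contains x) os := by
      rw [List.filter_cons]; simp [hnot]
    have hM : List.filter (fun x => (n :: ns).contains x && decide (oldd.get? x ≠ newd.get? x)) (o :: os)
        = List.filter (fun x => (n :: ns).contains x && decide (oldd.get? x ≠ newd.get? x)) os := by
      rw [List.filter_cons]; simp [hnot]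
    simp only [pvMerge, if_pos hlt, ih hos hy]
    rw [hA, hR, hM]
  | case4 o os n ns hlt hgt a r m heq ih =>
    obtain ⟨ho, hos⟩ := List.pairwise_cons.mp hx
    obtain ⟨hn, hns⟩ := List.pairwise_cons.mp hy
    have hnx : ∀ x ∈ o :: os, n < x := by
      intro x hx'
      rcases List.mem_cons.mp hx' with h | h
      · exact h ▸ hgt
      · exact hgt.trans (ho x h)
    have hnot : n ∉ o :: os := fun h => lt_irrefl n (hnx n h)
    have hA : List.filter (fun y => !(o :: os).contains y) (n :: ns)
        = n :: List.filter (fun y => !(o :: os).contains y) ns := by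
      rw [List.filter_cons]; simp [hnot]
    have hR : List.filter (fun x => !(n :: ns).contains x) (o :: os)
        = List.filter (fun x => !ns.contains x) (o :: os) :=
      List.filter_congr (fun x hx' => by
        have : x ≠ n := ne_of_gt (hnx x hx'); simp [this])
    have hM : List.filter (fun x => (n :: ns).contains x && decide (oldd.get? x ≠ newd.get? x)) (o :: os)
        = List.filter (fun x => ns.contains x && decide (oldd.get? x ≠ newd.get? x)) (o :: os) :=
      List.filter_congr (fun x hx' => by
        have : x ≠ n := ne_of_gt (hnx x hx'); simp [this])
    simp only [pvMerge, if_neg (asymm hgt), if_pos hgt, ih hx hns]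
    rw [hA, hR, hM]
  | case5 o os n ns hlt hgt a r m heq hd ih =>
    have heqon : o = n := le_antisymm (not_lt.mp hgt) (not_lt.mp hlt)
    subst heqon
    obtain ⟨ho, hos⟩ := List.pairwise_cons.mp hx
    obtain ⟨hn, hns⟩ := List.pairwise_cons.mp hy
    have hnoto : o ∉ ns := fun h => lt_irrefl o (hn o h)
    have hnotos : o ∉ os := fun h => lt_irrefl o (ho o h)
    have hA : List.filter (fun y => !(o :: os).contains y) ns
        = List.filter (fun y => !os.contains y) ns :=
      List.filter_congr (fun y hy' => by
        have : y ≠ o := ne_of_gt (hn y hy'); simp [this])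
    have hR : List.filter (fun x => !(o :: ns).contains x) os
        = List.filter (fun x => !ns.contains x) os :=
      List.filter_congr (fun x hx' => by
        have : x ≠ o := ne_of_gt (ho x hx'); simp [this])
    have hM : List.filter (fun x => (o :: ns).contains x && decide (oldd.get? x ≠ newd.get? x)) os
        = List.filter (fun x => ns.contains x && decide (oldd.get? x ≠ newd.get? x)) os :=
      List.filter_congr (fun x hx' => by
        have : x ≠ o := ne_of_gt (ho x hx'); simp [this])
    have e1 : List.filter (fun y => !(o :: os).contains y) (o :: ns)
        = List.filter (fun y => !os.contains y) ns := by
      rw [List.filter_cons, hA]; simp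
    have e2 : List.filter (fun x => !(o :: ns).contains x) (o :: os)
        = List.filter (fun x => !ns.contains x) os := by
      rw [List.filter_cons, hR]; simp
    have e3 : List.filter (fun x => (o :: ns).contains x && decide (oldd.get? x ≠ newd.get? x)) (o :: os)
        = o :: List.filter (fun x => ns.contains x && decide (oldd.get? x ≠ newd.get? x)) os := by
      rw [List.filter_cons, hM]; simp [hd]
    simp only [pvMerge, if_neg (lt_irrefl o), ih hos hns, if_pos hd]
    rw [e1, e2, e3]
  | case6 o os n ns hlt hgt a r m heq hd ih =>
    have heqon : o = n := le_antisymm (not_lt.mp hgt) (not_lt.mp hlt)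
    subst heqon
    obtain ⟨ho, hos⟩ := List.pairwise_cons.mp hx
    obtain ⟨hn, hns⟩ := List.pairwise_cons.mp hy
    have hnoto : o ∉ ns := fun h => lt_irrefl o (hn o h)
    have hnotos : o ∉ os := fun h => lt_irrefl o (ho o h)
    have heqv : oldd.get? o = newd.get? o := not_ne_iff.mp hd
    have hA : List.filter (fun y => !(o :: os).contains y) ns
        = List.filter (fun y => !os.contains y) ns :=
      List.filter_congr (fun y hy' => by
        have : y ≠ o := ne_of_gt (hn y hy'); simp [this])
    have hR : List.filter (fun x => !(o :: ns).contains x) os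
        = List.filter (fun x => !ns.contains x) os :=
      List.filter_congr (fun x hx' => by
        have : x ≠ o := ne_of_gt (ho x hx'); simp [this])
    have hM : List.filter (fun x => (o :: ns).contains x && decide (oldd.get? x ≠ newd.get? x)) os
        = List.filter (fun x => ns.contains x && decide (oldd.get? x ≠ newd.get? x)) os :=
      List.filter_congr (fun x hx' => by
        have : x ≠ o := ne_of_gt (ho x hx'); simp [this])
    have e1 : List.filter (fun y => !(o :: os).contains y) (o :: ns)
        = List.filter (fun y => !os.contains y) ns := by
      rw [List.filter_cons, hA]; simp
    have e2 : List.filter (fun x => !(o :: ns).contains x) (o :: os)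
        = List.filter (fun x => !ns.contains x) os := by
      rw [List.filter_cons, hR]; simp
    have e3 : List.filter (fun x => (o :: ns).contains x && decide (oldd.get? x ≠ newd.get? x)) (o :: os)
        = List.filter (fun x => ns.contains x && decide (oldd.get? x ≠ newd.get? x)) os := by
      rw [List.filter_cons, hM]; simp [heqv]
    simp only [pvMerge, if_neg (lt_irrefl o), ih hos hns, if_neg hd]
    rw [e1, e2, e3]

-- a Bool-level restatement: membership in the sorted list is membership in the original
theorem pv_contains_sorted (l : List String) (y : String) :
    (PySem.List.sorted l (fun x => x)).contains y = l.contains y := by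
  by_cases h : y ∈ l
  · simp [h, (PySem.List.mem_sorted l (fun x => x) false y).mpr h]
  · simp [h, PySem.List.mem_sorted]

-- A's append-loop over `common` is a filter
theorem pv_fold_filter (d1 d2 : PySem.Dict String String) (l : List String) :
    l.foldl (fun acc k => if d1.get? k ≠ d2.get? k then acc ++ [k] else acc) []
      = l.filter (fun k => decide (d1.get? k ≠ d2.get? k)) := by
  simpa using PySem.List.foldl_append_if
    (fun k => decide (d1.get? k ≠ d2.get? k)) (fun k => k) l []

theorem compare_file_states_spec : Claim_equal_compare_file_states := by
  intro old_files new_files _ hpre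
  obtain ⟨hno, hnn⟩ := hpre
  unfold Spec_compare_file_states
  simp only [compare_file_states, compare_file_states_alt]
  simp only [PySem.Dict.keys_mk]
  set d1 := PySem.Dict.mk old_files with hd1
  set d2 := PySem.Dict.mk new_files with hd2
  set ok0 := old_files.map Prod.fst with hok0
  set nk0 := new_files.map Prod.fst with hnk0
  set sok := PySem.List.sorted ok0 (fun x => x) with hsok
  set snk := PySem.List.sorted nk0 (fun x => x) with hsnk
  have hpo : sok.Perm ok0 := PySem.List.sorted_perm ok0 (fun x => x) false
  have hpn : snk.Perm nk0 := PySem.List.sorted_perm nk0 (fun x => x) false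
  have hso : sok.Pairwise (· < ·) :=
    pv_strict_of_nodup_le sok (hpo.nodup_iff.mpr hno) (PySem.List.sorted_pairwise ok0 (fun x => x))
  have hsn : snk.Pairwise (· < ·) :=
    pv_strict_of_nodup_le snk (hpn.nodup_iff.mpr hnn) (PySem.List.sorted_pairwise nk0 (fun x => x))
  rw [PySem.Set.ofList_eq_self_of_nodup ok0 hno, PySem.Set.ofList_eq_self_of_nodup nk0 hnn,
    pvMerge_spec d1 d2 sok snk hso hsn, pv_fold_filter d1 d2]
  have hco : ∀ y, sok.contains y = ok0.contains y := fun y => pv_contains_sorted ok0 y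
  have hcn : ∀ y, snk.contains y = nk0.contains y := fun y => pv_contains_sorted nk0 y
  refine Prod.ext ?_ (Prod.ext ?_ ?_)
  · -- added
    show PySem.List.sorted (PySem.Set.diff nk0 ok0) (fun x => x)
        = snk.filter (fun n => !sok.contains n)
    refine PySem.List.sorted_eq_of_perm_of_pairwise_lt _ _ _ ?_ ?_
    · rw [List.filter_congr (fun y _ => by rw [hco y] :
        ∀ y ∈ snk, (!sok.contains y) = (!ok0.contains y))]
      exact hpn.filter (fun n => !ok0.contains n)
    · exact List.Pairwise.sublist List.filter_sublist hsn
  · -- removed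
    show PySem.List.sorted (PySem.Set.diff ok0 nk0) (fun x => x)
        = sok.filter (fun o => !snk.contains o)
    refine PySem.List.sorted_eq_of_perm_of_pairwise_lt _ _ _ ?_ ?_
    · rw [List.filter_congr (fun y _ => by rw [hcn y] :
        ∀ y ∈ sok, (!snk.contains y) = (!nk0.contains y))]
      exact hpo.filter (fun o => !nk0.contains o)
    · exact List.Pairwise.sublist List.filter_sublist hso
  · -- modified
    show PySem.List.sorted
        ((PySem.Set.inter ok0 nk0).filter (fun k => decide (d1.get? k ≠ d2.get? k))) (fun x => x)
        = sok.filter (fun o => snk.contains o && decide (d1.get? o ≠ d2.get? o))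
    refine PySem.List.sorted_eq_of_perm_of_pairwise_lt _ _ _ ?_ ?_
    · have h1 : (PySem.Set.inter ok0 nk0).filter (fun k => decide (d1.get? k ≠ d2.get? k))
          = ok0.filter (fun o => nk0.contains o && decide (d1.get? o ≠ d2.get? o)) := by
        simp only [PySem.Set.inter, PySem.Set.contains, List.filter_filter]
        exact List.filter_congr (fun y _ => Bool.and_comm _ _)
      have h2 : sok.filter (fun o => snk.contains o && decide (d1.get? o ≠ d2.get? o))
          = sok.filter (fun o => nk0.contains o && decide (d1.get? o ≠ d2.get? o)) :=
        List.filter_congr (fun y _ => by rw [hcn y])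
      rw [h1, h2]
      exact hpo.filter (fun o => nk0.contains o && decide (d1.get? o ≠ d2.get? o))
    · exact List.Pairwise.sublist List.filter_sublist hso
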